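-- pv_equiv track=rewrite | github.com/ViralTexts/vt-passim | scripts/wit-collate.py | lead_gap
-- ===== SOURCE A (Python) =====
-- def lead_gap(s):
--     res = 0
--     for c in s:
--         if c.isspace():
--             continue
--         if c != '-':
--             break
--         res += 1
--     return res
-- ===== SOURCE B (Python) =====
-- def lead_gap(s):
--     t = ''.join(c for c in s if not c.isspace())
--     return len(t) - len(t.lstrip('-'))
-- ===== Notes on version B (the rewrite author's own statement) =====
-- stated objective: alternative
-- what changed: Instead of a fused skip/count/break accumulating loop, B first deletes all whitespace from the string and then measures the leading dash run as len(t) - len(t.lstrip('-')), i.e. by a length difference rather than by counting.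
import Mathlib
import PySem

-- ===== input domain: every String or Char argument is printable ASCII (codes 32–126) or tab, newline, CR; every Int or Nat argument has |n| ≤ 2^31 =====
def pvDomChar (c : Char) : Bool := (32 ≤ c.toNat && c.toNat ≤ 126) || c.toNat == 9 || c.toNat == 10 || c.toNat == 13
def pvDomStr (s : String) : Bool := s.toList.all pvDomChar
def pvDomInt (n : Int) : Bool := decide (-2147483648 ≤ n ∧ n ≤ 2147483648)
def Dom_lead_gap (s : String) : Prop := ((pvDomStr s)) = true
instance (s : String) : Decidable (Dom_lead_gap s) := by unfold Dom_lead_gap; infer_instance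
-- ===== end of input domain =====

-- B deletes all whitespace first and then measures the leading dash run as a length difference
-- (len(t) - len(t.lstrip('-'))) instead of A's fused skip/count/break accumulating loop (alternative; same cost).

-- ===== PORT A =====
-- the for-loop with continue/break, as structural recursion carrying the accumulator `res`
def leadGapLoop : List Char → Int → Int
  | [], res => res
  | c :: t, res =>
    if PySem.Chars.isspace c then leadGapLoop t res
    else if c ≠ '-' then res
    else leadGapLoop t (res + 1)

def lead_gap (s : String) : Int := leadGapLoop s.toList 0

-- ===== PORT B =====
-- t = ''.join(c for c in s if not c.isspace()); return len(t) - len(t.lstrip('-'))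
-- t.lstrip('-') removes exactly the leading run of '-' characters: ported as dropWhile (· == '-') (exact).
def lead_gap_alt (s : String) : Int :=
  let t : List Char := s.toList.filter (fun c => !PySem.Chars.isspace c)
  (t.length : Int) - ((t.dropWhile (fun c => c == '-')).length : Int)

-- ===== PRECONDITION & SPEC =====
def Spec_lead_gap (s : String) (out : Int) : Prop := out = lead_gap_alt s
instance (s : String) (out : Int) : Decidable (Spec_lead_gap s out) := by unfold Spec_lead_gap; infer_instance

-- ===== CLAIM (what is proved, stated in full; the proofs are below) =====
def Claim_equal_lead_gap : Prop := ∀ (s : String), Dom_lead_gap s → Spec_lead_gap s (lead_gap s)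

-- ===== LEMMAS AND PROOFS =====

-- length-difference form of B = length of the leading dash run of the filtered list
theorem len_sub_dropWhile (l : List Char) :
    (l.length : Int) - ((l.dropWhile (fun c => c == '-')).length : Int)
      = ((l.takeWhile (fun c => c == '-')).length : Int) := by
  have h : (l.takeWhile (fun c => c == '-')).length + (l.dropWhile (fun c => c == '-')).length
      = l.length := by
    rw [← List.length_append, List.takeWhile_append_dropWhile]
  omega

-- A's loop computes res + (leading dash run of the whitespace-filtered tail)
theorem leadGapLoop_eq (l : List Char) (res : Int) :
    leadGapLoop l res =
      res + (((l.filter (fun c => !PySem.Chars.isspace c)).takeWhile (fun c => c == '-')).length : Int) := by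
  induction l generalizing res with
  | nil => simp [leadGapLoop]
  | cons c t ih =>
    by_cases hs : PySem.Chars.isspace c = true
    · simp [leadGapLoop, hs, List.filter, ih]
    · by_cases hd : c = '-'
      · subst hd
        simp [leadGapLoop, hs, List.filter, ih]
        omega
      · have hne : (c == '-') = false := by simpa using hd
        simp [leadGapLoop, hs, hd, List.filter, hne]

-- ===== VERDICT (by name: the statement is the Claim_ definition above) =====
theorem lead_gap_spec : Claim_equal_lead_gap := by
  intro s _
  unfold Spec_lead_gap lead_gap lead_gap_alt
  rw [leadGapLoop_eq, len_sub_dropWhile]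
  omega
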